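-- pv_equiv track=rewrite | github.com/jonDomino/domino-bot | main.py | derive_implied_yes_asks
-- ===== SOURCE A (Python) =====
-- from typing import Optional, Dict, Any, Tuple, List
--
-- def derive_implied_yes_asks(no_bids: List[List[int]]) -> List[Tuple[int, int]]:
--     """
--     Derive implied YES asks from NO bids.
--     Returns list of (price_cents, qty) sorted by price ascending.
--     """
--     if not no_bids:
--         return []
--
--     # Best bid is last element
--     implied_asks = []
--     for no_price, no_qty in no_bids:
--         yes_ask = 100 - no_price
--         implied_asks.append((yes_ask, no_qty))
--
--     # Sort by price ascending (lowest first)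
--     implied_asks.sort(key=lambda x: x[0])
--     return implied_asks
-- ===== SOURCE B (Python) =====
-- from typing import List, Tuple
--
-- def derive_implied_yes_asks(no_bids: List[List[int]]) -> List[Tuple[int, int]]:
--     """
--     Derive implied YES asks from NO bids by bucketing: group (100 - no_price, qty)
--     tuples by price in a dict, then emit buckets in ascending key order.
--     """
--     buckets = {}
--     for no_price, no_qty in no_bids:
--         yes_ask = 100 - no_price
--         buckets.setdefault(yes_ask, []).append((yes_ask, no_qty))
--     out = []
--     for k in sorted(buckets):
--         out.extend(buckets[k])
--     return out
-- ===== Notes on version B (the rewrite author's own statement) =====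
-- stated objective: alternative
-- what changed: Replaces the global stable comparison sort of all (price, qty) tuples by a single grouping pass into a dict of per-price buckets followed by a sort of the distinct prices only, concatenating buckets in ascending key order (append order preserves the stable-sort tie order).
import Mathlib
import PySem

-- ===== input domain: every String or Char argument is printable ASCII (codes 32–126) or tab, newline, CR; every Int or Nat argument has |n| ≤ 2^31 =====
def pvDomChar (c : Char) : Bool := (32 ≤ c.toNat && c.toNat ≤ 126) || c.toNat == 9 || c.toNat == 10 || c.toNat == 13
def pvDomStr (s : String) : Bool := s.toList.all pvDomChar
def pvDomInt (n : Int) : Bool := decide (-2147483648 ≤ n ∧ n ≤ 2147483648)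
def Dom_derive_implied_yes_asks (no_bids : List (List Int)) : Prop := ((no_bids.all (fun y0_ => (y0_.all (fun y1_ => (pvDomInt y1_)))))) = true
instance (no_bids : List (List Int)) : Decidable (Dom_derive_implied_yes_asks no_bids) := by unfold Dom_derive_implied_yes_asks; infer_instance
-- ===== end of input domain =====

-- B replaces the single stable sort of all tuples by a dict bucketing pass plus a sort of the distinct prices; same result.

-- ===== PORT A =====
-- 'for no_price, no_qty in no_bids' unpacks rows of length 2 (Pre_); row.getD is exact under Pre_.
def derive_implied_yes_asks (no_bids : List (List Int)) : List (Int × Int) :=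
  if no_bids = [] then []
  else
    let implied_asks := no_bids.foldl (fun acc row => acc ++ [(100 - row.getD 0 0, row.getD 1 0)]) []
    PySem.List.sorted implied_asks (fun x => x.1) false

-- ===== PORT B =====
def derive_implied_yes_asks_alt (no_bids : List (List Int)) : List (Int × Int) :=
  let buckets : PySem.Dict Int (List (Int × Int)) :=
    no_bids.foldl
      (fun d row => d.modify (100 - row.getD 0 0) [] (· ++ [(100 - row.getD 0 0, row.getD 1 0)]))
      PySem.Dict.empty
  (PySem.List.sorted buckets.keys (fun k => k) false).foldl
    (fun out k => out ++ buckets.getD k []) []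

-- ===== PRECONDITION & SPEC =====
-- Pre_ excludes only inputs on which Python A raises ValueError: rows that are not [price, qty] pairs.
def Pre_derive_implied_yes_asks (no_bids : List (List Int)) : Prop :=
  ∀ row ∈ no_bids, row.length = 2
instance (no_bids : List (List Int)) : Decidable (Pre_derive_implied_yes_asks no_bids) := by
  unfold Pre_derive_implied_yes_asks; infer_instance

def pvWitness_derive_implied_yes_asks : List (List Int) := [[30, 5], [40, 2], [30, 1]]

def Spec_derive_implied_yes_asks (no_bids : List (List Int)) (out : List (Int × Int)) : Prop :=
  out = derive_implied_yes_asks_alt no_bids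
instance (no_bids : List (List Int)) (out : List (Int × Int)) : Decidable (Spec_derive_implied_yes_asks no_bids out) := by
  unfold Spec_derive_implied_yes_asks; infer_instance

-- ===== CLAIM (what is proved, stated in full; the proofs are below) =====
def Claim_equal_derive_implied_yes_asks : Prop := ∀ (no_bids : List (List Int)), Dom_derive_implied_yes_asks no_bids → Pre_derive_implied_yes_asks no_bids → Spec_derive_implied_yes_asks no_bids (derive_implied_yes_asks no_bids)

-- ===== LEMMAS AND PROOFS =====

theorem insertBy_cons_pos {α : Type} (before : α → α → Bool) (x y : α) (ys : List α)
    (h : before x y = true) :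
    PySem.List.insertBy before x (y :: ys) = x :: y :: ys := by
  simp [PySem.List.insertBy, h]

theorem insertBy_cons_neg {α : Type} (before : α → α → Bool) (x y : α) (ys : List α)
    (h : before x y = false) :
    PySem.List.insertBy before x (y :: ys) = y :: PySem.List.insertBy before x ys := by
  simp [PySem.List.insertBy, h]

theorem insertBy_all_before {α : Type} (before : α → α → Bool) (x : α) (zs : List α)
    (h : ∀ z ∈ zs, before x z = true) :
    PySem.List.insertBy before x zs = x :: zs := by
  cases zs with
  | nil => rfl
  | cons z zs =>
      simp [PySem.List.insertBy, h z (by simp)]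

theorem insertBy_append_left {α : Type} (before : α → α → Bool) (x : α) (ys zs : List α)
    (h : ∀ y ∈ ys, before x y = false) :
    PySem.List.insertBy before x (ys ++ zs) = ys ++ PySem.List.insertBy before x zs := by
  induction ys with
  | nil => rfl
  | cons y ys ih =>
      have hy : before x y = false := h y (by simp)
      simp [PySem.List.insertBy, hy]
      exact ih (fun y hmem => h y (by simp [hmem]))

theorem insertBy_split {α : Type} (before : α → α → Bool) (x : α) (ys zs : List α)
    (h1 : ∀ y ∈ ys, before x y = false) (h2 : ∀ z ∈ zs, before x z = true) :
    PySem.List.insertBy before x (ys ++ zs) = ys ++ x :: zs := by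
  rw [insertBy_append_left before x ys zs h1, insertBy_all_before before x zs h2]

theorem mem_filter_fst {ps : List (Int × Int)} {k : Int} {p : Int × Int}
    (h : p ∈ ps.filter (fun p => p.1 == k)) : p.1 = k := by
  have := List.mem_filter.1 h
  exact beq_iff_eq.1 this.2

theorem flatMap_bucket_noop (ps : List (Int × Int)) (x : Int × Int) (K : List Int)
    (h : ∀ k ∈ K, ¬ x.1 = k) :
    K.flatMap (fun k => ps.filter (fun p => p.1 == k) ++ if x.1 == k then [x] else []) =
    K.flatMap (fun k => ps.filter (fun p => p.1 == k)) := by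
  induction K with
  | nil => rfl
  | cons k K ih =>
      have hk : (x.1 == k) = false := by
        simpa using h k (by simp)
      simp only [List.flatMap_cons, hk, if_neg Bool.false_ne_true, List.append_nil]
      rw [ih (fun k hk => h k (by simp [hk]))]

theorem ins_mem (ps : List (Int × Int)) (x : Int × Int) (K : List Int)
    (hK : K.Pairwise (· < ·)) (hx : x.1 ∈ K) :
    PySem.List.insertBy (fun a b => decide ((fun y : Int × Int => y.1) a < (fun y : Int × Int => y.1) b)) x
      (K.flatMap (fun k => ps.filter (fun p => p.1 == k))) =
    K.flatMap (fun k => ps.filter (fun p => p.1 == k) ++ if x.1 == k then [x] else []) := by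
  induction K with
  | nil => simp at hx
  | cons k K ih =>
      have hlt : ∀ k' ∈ K, k < k' := fun k' h' => (List.pairwise_cons.1 hK).1 k' h'
      by_cases hk : x.1 = k
      · -- x joins the bucket of k, after its existing elements
        have h1 : ∀ y ∈ ps.filter (fun p => p.1 == k), (decide (x.1 < y.1)) = false := by
          intro y hy; rw [mem_filter_fst hy, hk]; simp
        have h2 : ∀ z ∈ K.flatMap (fun k => ps.filter (fun p => p.1 == k)),
            (decide (x.1 < z.1)) = true := by
          intro z hz
          obtain ⟨k', hk', hz'⟩ := List.mem_flatMap.1 hz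
          rw [mem_filter_fst hz', hk]
          simpa using hlt k' hk'
        simp only [List.flatMap_cons]
        rw [insertBy_split _ x _ _ h1 h2]
        have hne : ∀ k' ∈ K, ¬ x.1 = k' := fun k' h' heq => by
          have := hlt k' h'; omega
        rw [flatMap_bucket_noop ps x K hne]
        simp [hk]
      · -- x belongs further right
        have hxK : x.1 ∈ K := by
          rcases List.mem_cons.1 hx with h | h
          · exact absurd h hk
          · exact h
        have hkx : k < x.1 := hlt _ hxK
        have h1 : ∀ y ∈ ps.filter (fun p => p.1 == k), (decide (x.1 < y.1)) = false := by
          intro y hy; rw [mem_filter_fst hy]; simp; omega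
        simp only [List.flatMap_cons]
        rw [insertBy_append_left _ x _ _ h1, ih (List.pairwise_cons.1 hK).2 hxK]
        have hk' : (x.1 == k) = false := by simpa using hk
        simp [hk']

theorem ins_new (ps : List (Int × Int)) (x : Int × Int) (K : List Int)
    (hK : K.Pairwise (· < ·)) (hx : x.1 ∉ K)
    (h0 : ps.filter (fun p => p.1 == x.1) = []) :
    PySem.List.insertBy (fun a b => decide ((fun y : Int × Int => y.1) a < (fun y : Int × Int => y.1) b)) x
      (K.flatMap (fun k => ps.filter (fun p => p.1 == k))) =
    (PySem.List.insertBy (fun a b => decide ((fun k : Int => k) a < (fun k : Int => k) b)) x.1 K).flatMap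
      (fun k => ps.filter (fun p => p.1 == k) ++ if x.1 == k then [x] else []) := by
  induction K with
  | nil =>
      simp [PySem.List.insertBy, h0]
  | cons k K ih =>
      have hlt : ∀ k' ∈ K, k < k' := fun k' h' => (List.pairwise_cons.1 hK).1 k' h'
      by_cases hxk : x.1 < k
      · -- x opens a new first bucket
        have h2 : ∀ z ∈ (k :: K).flatMap (fun k => ps.filter (fun p => p.1 == k)),
            (decide (x.1 < z.1)) = true := by
          intro z hz
          obtain ⟨k', hk', hz'⟩ := List.mem_flatMap.1 hz
          rw [mem_filter_fst hz']
          rcases List.mem_cons.1 hk' with h | h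
          · subst h; simpa using hxk
          · have := hlt _ h; simp; omega
        rw [insertBy_all_before _ x _ h2]
        have hxk' : (decide ((fun k : Int => k) x.1 < (fun k : Int => k) k)) = true := by simpa using hxk
        rw [insertBy_cons_pos _ _ _ _ hxk']
        have hne : ∀ k' ∈ (k :: K), ¬ x.1 = k' := by
          intro k' h' heq
          rcases List.mem_cons.1 h' with h | h
          · subst h; omega
          · have := hlt _ h; omega
        simp only [List.flatMap_cons]
        rw [flatMap_bucket_noop ps x K (fun k' h' => hne k' (by simp [h']))]
        have hxk3 : (x.1 == k) = false := by simpa using hne k (by simp)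
        simp [h0, hxk3]
      · -- x belongs after the bucket of k
        have hkne : ¬ x.1 = k := fun heq => hx (by simp [heq])
        have hxK : x.1 ∉ K := fun h => hx (by simp [h])
        have h1 : ∀ y ∈ ps.filter (fun p => p.1 == k), (decide (x.1 < y.1)) = false := by
          intro y hy; rw [mem_filter_fst hy]; simpa using hxk
        have hxk' : (decide (x.1 < k)) = false := by simpa using hxk
        simp only [List.flatMap_cons]
        rw [insertBy_append_left _ x _ _ h1, ih (List.pairwise_cons.1 hK).2 hxK]
        have hxk2 : (decide ((fun k : Int => k) x.1 < (fun k : Int => k) k)) = false := by simpa using hxk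
        rw [insertBy_cons_neg _ _ _ _ hxk2]
        simp only [List.flatMap_cons]
        have hk' : (x.1 == k) = false := by simpa using hkne
        simp only [hk', if_neg Bool.false_ne_true, List.append_nil]

-- stable sort by price = buckets concatenated in ascending order of the distinct prices
theorem sorted_eq_flatMap_buckets (ps : List (Int × Int)) :
    PySem.List.sorted ps (fun x => x.1) false =
    (PySem.List.sorted (PySem.Set.ofList (ps.map (·.1))) (fun k => k) false).flatMap
      (fun k => ps.filter (fun p => p.1 == k)) := by
  induction ps using List.reverseRecOn with
  | nil => rfl
  | append_singleton ps x ih =>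
      have hsort : PySem.List.sorted (ps ++ [x]) (fun y : Int × Int => y.1) false =
          PySem.List.insertBy (fun a b => decide ((fun y : Int × Int => y.1) a < (fun y : Int × Int => y.1) b)) x
            (PySem.List.sorted ps (fun y : Int × Int => y.1) false) := by
        rw [PySem.List.sorted_eq_foldl_insertBy, PySem.List.sorted_eq_foldl_insertBy,
          List.foldl_append, List.foldl_cons, List.foldl_nil]
      have hpair : (PySem.List.sorted (PySem.Set.ofList (ps.map (·.1))) (fun k : Int => k) false).Pairwise (· < ·) :=
        PySem.List.sorted_ofList_pairwise_lt _
      have hfilter : ∀ k : Int, (ps ++ [x]).filter (fun p => p.1 == k) =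
          ps.filter (fun p => p.1 == k) ++ if x.1 == k then [x] else [] := by
        intro k; cases h : (x.1 == k) <;>
          simp [List.filter_append, List.filter, h]
      rw [hsort, ih]
      by_cases hmem : x.1 ∈ ps.map (·.1)
      · have hset : PySem.Set.ofList ((ps ++ [x]).map (·.1)) = PySem.Set.ofList (ps.map (·.1)) := by
          simp only [List.map_append, List.map_cons, List.map_nil]
          rw [PySem.Set.ofList_append_singleton]
          exact PySem.Set.add_of_mem (by simpa using (PySem.Set.mem_ofList _ _).2 hmem)
        have hxK : x.1 ∈ PySem.List.sorted (PySem.Set.ofList (ps.map (·.1))) (fun k : Int => k) false :=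
          (PySem.List.mem_sorted _ _ _ _).2 ((PySem.Set.mem_ofList _ _).2 hmem)
        rw [hset, ins_mem ps x _ hpair hxK]
        exact (List.flatMap_congr (fun k _ => (hfilter k).symm))
      · have hset : PySem.Set.ofList ((ps ++ [x]).map (·.1)) =
            PySem.Set.ofList (ps.map (·.1)) ++ [x.1] := by
          simp only [List.map_append, List.map_cons, List.map_nil]
          rw [PySem.Set.ofList_append_singleton]
          exact PySem.Set.add_of_not_mem (fun h => hmem ((PySem.Set.mem_ofList _ _).1 h))
        have hxK : x.1 ∉ PySem.List.sorted (PySem.Set.ofList (ps.map (·.1))) (fun k : Int => k) false :=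
          fun h => hmem ((PySem.Set.mem_ofList _ _).1 ((PySem.List.mem_sorted _ _ _ _).1 h))
        have h0 : ps.filter (fun p => p.1 == x.1) = [] := by
          rw [List.filter_eq_nil_iff]
          intro p hp hpx
          exact hmem (List.mem_map.2 ⟨p, hp, beq_iff_eq.1 hpx⟩)
        have hsortK : PySem.List.sorted (PySem.Set.ofList (ps.map (·.1)) ++ [x.1]) (fun k : Int => k) false =
            PySem.List.insertBy (fun a b => decide ((fun k : Int => k) a < (fun k : Int => k) b)) x.1
              (PySem.List.sorted (PySem.Set.ofList (ps.map (·.1))) (fun k : Int => k) false) := by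
          rw [PySem.List.sorted_eq_foldl_insertBy, PySem.List.sorted_eq_foldl_insertBy,
            List.foldl_append, List.foldl_cons, List.foldl_nil]
        rw [hset, hsortK, ins_new ps x _ hpair hxK h0]
        exact (List.flatMap_congr (fun k _ => (hfilter k).symm))

-- ===== VERDICT (by name: the statement is the Claim_ definition above) =====
theorem derive_implied_yes_asks_spec : Claim_equal_derive_implied_yes_asks := by
  intro no_bids _ _
  unfold Spec_derive_implied_yes_asks derive_implied_yes_asks derive_implied_yes_asks_alt
  by_cases hnil : no_bids = []
  · subst hnil; rfl
  · rw [if_neg hnil]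
    show PySem.List.sorted
        (no_bids.foldl (fun acc row => acc ++ [(100 - row.getD 0 0, row.getD 1 0)]) []) (fun x => x.1) false =
      (PySem.List.sorted
          (no_bids.foldl (fun d row => d.modify (100 - row.getD 0 0) [] (· ++ [(100 - row.getD 0 0, row.getD 1 0)])) PySem.Dict.empty).keys
          (fun k => k) false).foldl
        (fun out k => out ++ (no_bids.foldl (fun d row => d.modify (100 - row.getD 0 0) [] (· ++ [(100 - row.getD 0 0, row.getD 1 0)])) PySem.Dict.empty).getD k []) []
    rw [PySem.List.foldl_append_singleton_eq_map]
    set g : List Int → Int × (Int × Int) :=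
      fun row => (100 - row.getD 0 0, (100 - row.getD 0 0, row.getD 1 0)) with hg
    have hfold : no_bids.foldl
        (fun d row => d.modify (100 - row.getD 0 0) [] (· ++ [(100 - row.getD 0 0, row.getD 1 0)]))
        PySem.Dict.empty =
        (no_bids.map g).foldl (fun d q => d.modify q.1 [] (· ++ [q.2])) PySem.Dict.empty := by
      rw [List.foldl_map]
    rw [hfold]
    set ps : List (Int × Int) := no_bids.map (fun row => (100 - row.getD 0 0, row.getD 1 0)) with hps
    have hgetD : ∀ k : Int,
        ((no_bids.map g).foldl (fun d q => d.modify q.1 [] (· ++ [q.2])) PySem.Dict.empty).getD k [] =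
        ps.filter (fun p => p.1 == k) := by
      intro k
      rw [PySem.Dict.getD_foldl_modify_append]
      simp only [PySem.Dict.getD_empty, List.nil_append, List.filter_map, List.map_map, hg, hps]
      rfl
    have hkeys : ((no_bids.map g).foldl (fun d q => d.modify q.1 [] (· ++ [q.2])) PySem.Dict.empty).keys =
        PySem.Set.ofList (ps.map (·.1)) := by
      rw [List.foldl_map, PySem.Dict.keys_foldl_modify_key (key := fun row => (g row).1)]
      simp only [PySem.Dict.keys_empty, PySem.Set.update_nil_left, hps, List.map_map]
      rfl
    rw [hkeys]
    have hout : ∀ (K : List Int) (init : List (Int × Int)),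
        K.foldl (fun out k => out ++
          ((no_bids.map g).foldl (fun d q => d.modify q.1 [] (· ++ [q.2])) PySem.Dict.empty).getD k []) init =
        init ++ K.flatMap (fun k => ps.filter (fun p => p.1 == k)) := by
      intro K
      induction K with
      | nil => intro init; simp
      | cons k K ih =>
          intro init
          rw [List.foldl_cons, ih, hgetD k]
          simp
    rw [hout, List.nil_append]
    exact sorted_eq_flatMap_buckets ps
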